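-- pv_equiv track=rewrite | github.com/Elowarp/TIPE-2024-25 | Code/tests.py | min_coef
-- ===== SOURCE A (Python) =====
-- def taille(M, i, j):
--     m,n = len(M), len(M[0])
--     return m, n
--
-- def min_coef(M, i, j): #Renvoie le plus petit coef ds la mat extraite
--     m, n = taille(M, i, j)
--     i0 = i
--     j0 = j
--     min = M[i0][j0]
--     for k in range(i, m):
--         for l in range(j, n):
--             if (M[k][l] < min or min == 0) and M[k][l] !=0:
--                 min = M[k][l]
--                 i0, j0 = k, l
--
--     return (i0, j0)
-- ===== SOURCE B (Python) =====
-- def min_coef(M, i, j):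
--     m, n = len(M), len(M[0])
--     # pass 1: smallest nonzero value, seeded with the corner entry of the extracted matrix
--     seed = M[i][j]
--     best = seed if seed != 0 else None
--     for k in range(i, m):
--         for l in range(j, n):
--             v = M[k][l]
--             if v != 0 and (best is None or v < best):
--                 best = v
--     if best is None:
--         return (i, j)
--     # pass 2: first row-major position holding that value
--     for k in range(i, m):
--         for l in range(j, n):
--             if M[k][l] == best:
--                 return (k, l)
--     return (i, j)  # no scanned cell holds it (empty scan range)
-- ===== Notes on version B (the rewrite author's own statement) =====
-- stated objective: alternative
-- what changed: Replaces A's single nested-loop pass with mutable (min, i0, j0) state by a value/position decomposition: pass 1 computes only the smallest nonzero value (an Option seeded with the corner entry M[i][j], which A also reads), pass 2 rescans for its first row-major occurrence; no position state is threaded through the minimisation.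
import Mathlib
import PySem

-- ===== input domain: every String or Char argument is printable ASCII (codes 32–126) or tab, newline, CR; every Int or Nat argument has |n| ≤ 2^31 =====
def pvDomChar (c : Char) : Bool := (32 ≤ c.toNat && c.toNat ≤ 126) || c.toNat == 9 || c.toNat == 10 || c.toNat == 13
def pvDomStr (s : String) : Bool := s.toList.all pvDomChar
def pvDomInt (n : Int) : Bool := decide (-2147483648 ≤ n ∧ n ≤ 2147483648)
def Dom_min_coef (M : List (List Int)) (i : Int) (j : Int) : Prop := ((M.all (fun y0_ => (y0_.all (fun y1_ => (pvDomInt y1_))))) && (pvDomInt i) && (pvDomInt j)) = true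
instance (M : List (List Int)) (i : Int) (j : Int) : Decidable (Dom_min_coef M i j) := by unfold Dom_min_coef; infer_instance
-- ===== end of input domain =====

-- B separates "smallest nonzero value" (pass 1, seeded with the corner entry) from "its first row-major position" (pass 2);
-- A tracks value and position together in one stateful nested loop. Return values proved equal on Pre_.

-- M[k][l] with Python negative-index semantics, defaulted (the default is only reached outside Pre_)
def pvGet2 (M : List (List Int)) (k l : Int) : Int :=
  PySem.List.pyGetD ((PySem.List.pyGet? M k).getD []) l 0

-- ===== PORT A =====
def min_coef (M : List (List Int)) (i : Int) (j : Int) : Int × Int :=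
  let m : Int := (M.length : Int)
  let n : Int := (((PySem.List.pyGet? M 0).getD []).length : Int)
  let st : Int × Int × Int :=
    (PySem.List.pyRange i m 1).foldl (fun s k =>
      (PySem.List.pyRange j n 1).foldl (fun s l =>
        if (pvGet2 M k l < s.1 ∨ s.1 = 0) ∧ pvGet2 M k l ≠ 0 then (pvGet2 M k l, k, l) else s) s)
      (pvGet2 M i j, i, j)
  (st.2.1, st.2.2)

-- ===== PORT B =====
def min_coef_alt (M : List (List Int)) (i : Int) (j : Int) : Int × Int :=
  let m : Int := (M.length : Int)
  let n : Int := (((PySem.List.pyGet? M 0).getD []).length : Int)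
  let pos : List (Int × Int) :=
    (PySem.List.pyRange i m 1).flatMap (fun k => (PySem.List.pyRange j n 1).map (fun l => (k, l)))
  let seed : Int := pvGet2 M i j
  let best : Option Int :=
    pos.foldl (fun b p =>
      let v := pvGet2 M p.1 p.2
      if v ≠ 0 ∧ (b = none ∨ ∃ w, b = some w ∧ v < w) then some v else b)
      (if seed ≠ 0 then some seed else none)
  match best with
  | none => (i, j)
  | some w => (pos.find? (fun p => pvGet2 M p.1 p.2 == w)).getD (i, j)

-- ===== PRECONDITION & SPEC =====
-- Pre_ is exactly the set of inputs on which Python A returns (no IndexError): M nonempty,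
-- i a valid (possibly negative) row index, j valid in row M[i], and every entry M[k][l]
-- touched by the nested loops in range; ragged rows and negative indices are admitted.
def Pre_min_coef (M : List (List Int)) (i : Int) (j : Int) : Prop :=
  M ≠ [] ∧
  PySem.Raise.InRange M.length i ∧
  PySem.Raise.InRange ((PySem.List.pyGet? M i).getD []).length j ∧
  ∀ k ∈ PySem.List.pyRange i (M.length : Int) 1,
    ∀ l ∈ PySem.List.pyRange j (((PySem.List.pyGet? M 0).getD []).length : Int) 1,
      PySem.Raise.InRange ((PySem.List.pyGet? M k).getD []).length l
instance (M : List (List Int)) (i : Int) (j : Int) : Decidable (Pre_min_coef M i j) := by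
  unfold Pre_min_coef; infer_instance

def pvWitness_min_coef : List (List Int) × Int × Int := ([[0, 3], [2, 5]], 0, 0)

def Spec_min_coef (M : List (List Int)) (i : Int) (j : Int) (out : Int × Int) : Prop := out = min_coef_alt M i j
instance (M : List (List Int)) (i : Int) (j : Int) (out : Int × Int) : Decidable (Spec_min_coef M i j out) := by unfold Spec_min_coef; infer_instance

-- ===== CLAIM (what is proved, stated in full; the proofs are below) =====
def Claim_equal_min_coef : Prop := ∀ (M : List (List Int)) (i : Int) (j : Int), Dom_min_coef M i j → Pre_min_coef M i j → Spec_min_coef M i j (min_coef M i j)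

-- ===== LEMMAS AND PROOFS =====

-- smallest nonzero value of f over a list of positions (B's pass-1 summary)
def pvNz (f : Int × Int → Int) (p : Int × Int) : Option Int :=
  if f p = 0 then none else some (f p)

def pvOmin : Option Int → Option Int → Option Int
  | none, b => b
  | some u, none => some u
  | some u, some w => some (min u w)

def pvMnz (f : Int × Int → Int) : List (Int × Int) → Option Int
  | [] => none
  | p :: ps => pvOmin (pvNz f p) (pvMnz f ps)

theorem pvOmin_none_right (b : Option Int) : pvOmin b none = b := by
  cases b <;> rfl

-- A's nested loops as one fold over the row-major position list
theorem nestedA (M : List (List Int)) (as bs : List Int) (init : Int × Int × Int) :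
    as.foldl (fun s k => bs.foldl (fun s l =>
        if (pvGet2 M k l < s.1 ∨ s.1 = 0) ∧ pvGet2 M k l ≠ 0 then (pvGet2 M k l, k, l) else s) s) init
    = (as.flatMap (fun k => bs.map (fun l => (k, l)))).foldl (fun s p =>
        if (pvGet2 M p.1 p.2 < s.1 ∨ s.1 = 0) ∧ pvGet2 M p.1 p.2 ≠ 0 then (pvGet2 M p.1 p.2, p.1, p.2) else s) init := by
  induction as generalizing init with
  | nil => rfl
  | cons a as ih =>
    simp only [List.foldl_cons, List.flatMap_cons, List.foldl_append, List.foldl_map, ih]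

-- B's pass-1 fold computes pvMnz
theorem keyB (f : Int × Int → Int) (ps : List (Int × Int)) : ∀ (b : Option Int),
    ps.foldl (fun b p => if f p ≠ 0 ∧ (b = none ∨ ∃ w, b = some w ∧ f p < w) then some (f p) else b) b
      = pvOmin b (pvMnz f ps) := by
  induction ps with
  | nil => intro b; simp [pvMnz, pvOmin_none_right]
  | cons p ps ih =>
    intro b
    have hstep : (if f p ≠ 0 ∧ (b = none ∨ ∃ w, b = some w ∧ f p < w) then some (f p) else b)
        = pvOmin b (pvNz f p) := by
      by_cases hf : f p = 0
      · simp [hf, pvNz, pvOmin_none_right]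
      · cases b with
        | none => simp [hf, pvNz, pvOmin]
        | some u =>
          by_cases hlt : f p < u
          · simp [pvNz, pvOmin, hf, hlt, min_eq_right (le_of_lt hlt)]
          · simp [pvNz, pvOmin, hf, hlt, min_eq_left (le_of_not_gt hlt)]
    rw [List.foldl_cons, hstep, ih]
    show pvOmin (pvOmin b (pvNz f p)) (pvMnz f ps) = pvOmin b (pvOmin (pvNz f p) (pvMnz f ps))
    cases b <;> cases pvNz f p <;> cases pvMnz f ps <;> simp [pvOmin, min_assoc]

theorem pvMnz_ne_zero (f : Int × Int → Int) (ps : List (Int × Int)) (w : Int)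
    (h : pvMnz f ps = some w) : w ≠ 0 := by
  induction ps generalizing w with
  | nil => simp [pvMnz] at h
  | cons p ps ih =>
    by_cases hf : f p = 0
    · simp [pvMnz, pvNz, hf, pvOmin] at h
      exact ih w h
    · cases hm : pvMnz f ps with
      | none => simp [pvMnz, pvNz, hf, hm, pvOmin] at h; omega
      | some w' =>
        have hw' := ih w' hm
        simp [pvMnz, pvNz, hf, hm, pvOmin] at h
        rcases min_choice (f p) w' with h1 | h1 <;> omega

theorem pvMnz_none_zero (f : Int × Int → Int) (ps : List (Int × Int))
    (h : pvMnz f ps = none) : ∀ p ∈ ps, f p = 0 := by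
  induction ps with
  | nil => simp
  | cons r rs ih =>
    intro q hq
    by_cases hr : f r = 0
    · simp [pvMnz, pvNz, hr, pvOmin] at h
      rcases List.mem_cons.mp hq with hq | hq
      · exact hq ▸ hr
      · exact ih h q hq
    · cases hm2 : pvMnz f rs <;> simp [pvMnz, pvNz, hr, hm2, pvOmin] at h

theorem pvMnz_le (f : Int × Int → Int) (ps : List (Int × Int)) (w : Int)
    (h : pvMnz f ps = some w) : ∀ p ∈ ps, f p ≠ 0 → w ≤ f p := by
  induction ps generalizing w with
  | nil => simp [pvMnz] at h
  | cons p ps ih =>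
    intro q hq hfq
    by_cases hf : f p = 0
    · simp [pvMnz, pvNz, hf, pvOmin] at h
      rcases List.mem_cons.mp hq with hq | hq
      · exact absurd (hq ▸ hf) hfq
      · exact ih w h q hq hfq
    · cases hm : pvMnz f ps with
      | none =>
        simp [pvMnz, pvNz, hf, hm, pvOmin] at h
        rcases List.mem_cons.mp hq with hq | hq
        · subst hq; omega
        · exact absurd (pvMnz_none_zero f ps hm q hq) hfq
      | some w' =>
        simp [pvMnz, pvNz, hf, hm, pvOmin] at h
        rcases List.mem_cons.mp hq with hq | hq
        · subst hq; omega
        · have := ih w' hm q hq hfq; omega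

theorem pvMnz_mem (f : Int × Int → Int) (ps : List (Int × Int)) (w : Int)
    (h : pvMnz f ps = some w) : ∃ p ∈ ps, f p = w := by
  induction ps generalizing w with
  | nil => simp [pvMnz] at h
  | cons p ps ih =>
    by_cases hf : f p = 0
    · simp [pvMnz, pvNz, hf, pvOmin] at h
      obtain ⟨q, hq, hfq⟩ := ih w h
      exact ⟨q, List.mem_cons_of_mem _ hq, hfq⟩
    · cases hm : pvMnz f ps with
      | none =>
        simp [pvMnz, pvNz, hf, hm, pvOmin] at h
        exact ⟨p, List.mem_cons_self, by omega⟩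
      | some w' =>
        simp [pvMnz, pvNz, hf, hm, pvOmin] at h
        rcases min_choice (f p) w' with h1 | h1
        · exact ⟨p, List.mem_cons_self, by omega⟩
        · obtain ⟨q, hq, hfq⟩ := ih w' hm
          exact ⟨q, List.mem_cons_of_mem _ hq, by omega⟩

-- characterisation of A's single-pass fold by B's two quantities
def pvOut (f : Int × Int → Int) (ps : List (Int × Int)) (v q1 q2 : Int) : Int × Int × Int :=
  match pvMnz f ps with
  | none => (v, q1, q2)
  | some w =>
    if v ≠ 0 ∧ v ≤ w then (v, q1, q2)
    else (w, ((ps.find? fun p => f p == w).getD (q1, q2)).1,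
             ((ps.find? fun p => f p == w).getD (q1, q2)).2)

theorem pvOut_none (f : Int × Int → Int) (ps : List (Int × Int)) (v q1 q2 : Int)
    (h : pvMnz f ps = none) : pvOut f ps v q1 q2 = (v, q1, q2) := by
  simp [pvOut, h]

theorem pvOut_some (f : Int × Int → Int) (ps : List (Int × Int)) (v q1 q2 w : Int)
    (h : pvMnz f ps = some w) :
    pvOut f ps v q1 q2 =
      if v ≠ 0 ∧ v ≤ w then (v, q1, q2)
      else (w, ((ps.find? fun p => f p == w).getD (q1, q2)).1,
               ((ps.find? fun p => f p == w).getD (q1, q2)).2) := by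
  simp [pvOut, h]

theorem keyA (f : Int × Int → Int) (ps : List (Int × Int)) : ∀ (v q1 q2 : Int),
    ps.foldl (fun s p => if (f p < s.1 ∨ s.1 = 0) ∧ f p ≠ 0 then (f p, p.1, p.2) else s) (v, q1, q2)
      = pvOut f ps v q1 q2 := by
  induction ps with
  | nil => intro v q1 q2; simp [pvOut, pvMnz]
  | cons p ps ih =>
    intro v q1 q2
    rw [List.foldl_cons]
    by_cases hf : f p = 0
    · rw [if_neg (by simp [hf]), ih]
      have hmz : pvMnz f (p :: ps) = pvMnz f ps := by simp [pvMnz, pvNz, hf, pvOmin]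
      cases hm : pvMnz f ps with
      | none => rw [pvOut_none f ps v q1 q2 hm, pvOut_none f (p :: ps) v q1 q2 (hmz.trans hm)]
      | some w =>
        have hw := pvMnz_ne_zero f ps w hm
        rw [pvOut_some f ps v q1 q2 w hm, pvOut_some f (p :: ps) v q1 q2 w (hmz.trans hm),
            List.find?_cons_of_neg (by simp [hf]; omega)]
    · by_cases hup : f p < v ∨ v = 0
      · rw [if_pos ⟨hup, hf⟩, ih (f p) p.1 p.2]
        cases hm : pvMnz f ps with
        | none =>
          have hmz : pvMnz f (p :: ps) = some (f p) := by simp [pvMnz, pvNz, hf, hm, pvOmin]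
          rw [pvOut_none f ps (f p) p.1 p.2 hm, pvOut_some f (p :: ps) v q1 q2 (f p) hmz,
              if_neg (by omega), List.find?_cons_of_pos (by simp)]
          simp
        | some w' =>
          have hmz : pvMnz f (p :: ps) = some (min (f p) w') := by
            simp [pvMnz, pvNz, hf, hm, pvOmin]
          have hminle : min (f p) w' ≤ f p := min_le_left _ _
          rw [pvOut_some f ps (f p) p.1 p.2 w' hm, pvOut_some f (p :: ps) v q1 q2 _ hmz]
          have hcond : ¬(v ≠ 0 ∧ v ≤ min (f p) w') := by
            intro hcontra
            rcases hup with h | h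
            · exact absurd (le_trans hcontra.2 hminle) (not_le.mpr h)
            · exact hcontra.1 h
          by_cases hle : f p ≤ w'
          · rw [if_pos ⟨hf, hle⟩, if_neg hcond, min_eq_left hle,
                List.find?_cons_of_pos (by simp)]
            simp
          · have hlt : w' < f p := by omega
            rw [if_neg (fun h => hle h.2), if_neg hcond, min_eq_right (le_of_lt hlt),
                List.find?_cons_of_neg (by simp; omega)]
            obtain ⟨r, hr, hfr⟩ := pvMnz_mem f ps w' hm
            have hs : (ps.find? (fun p => f p == w')).isSome :=
              List.find?_isSome.mpr ⟨r, hr, by simp [hfr]⟩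
            obtain ⟨r0, hr0⟩ := Option.isSome_iff_exists.mp hs
            rw [hr0]
            simp
      · have hv : v ≤ f p ∧ v ≠ 0 := by omega
        rw [if_neg (fun h => hup h.1), ih v q1 q2]
        cases hm : pvMnz f ps with
        | none =>
          have hmz : pvMnz f (p :: ps) = some (f p) := by simp [pvMnz, pvNz, hf, hm, pvOmin]
          rw [pvOut_none f ps v q1 q2 hm, pvOut_some f (p :: ps) v q1 q2 (f p) hmz,
              if_pos ⟨hv.2, hv.1⟩]
        | some w' =>
          have hmz : pvMnz f (p :: ps) = some (min (f p) w') := by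
            simp [pvMnz, pvNz, hf, hm, pvOmin]
          rw [pvOut_some f ps v q1 q2 w' hm, pvOut_some f (p :: ps) v q1 q2 _ hmz]
          by_cases hle : v ≤ w'
          · rw [if_pos ⟨hv.2, hle⟩, if_pos ⟨hv.2, le_min hv.1 hle⟩]
          · have hlt : w' < v := by omega
            have hmr : min (f p) w' = w' := min_eq_right (by omega)
            rw [hmr, if_neg (by omega), if_neg (by omega),
                List.find?_cons_of_neg (by simp; omega)]

-- the row-major position list starts at (i, j) when nonempty
theorem headL (i j m n : Int)
    (h : ((PySem.List.pyRange i m 1).flatMap (fun k => (PySem.List.pyRange j n 1).map (fun l => (k, l)))) ≠ []) :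
    ∃ rest, ((PySem.List.pyRange i m 1).flatMap (fun k => (PySem.List.pyRange j n 1).map (fun l => (k, l)))) = ((i, j) : Int × Int) :: rest := by
  by_cases hi : i < m
  · by_cases hj : j < n
    · rw [PySem.List.pyRange_one_cons hi, PySem.List.pyRange_one_cons hj]
      exact ⟨_, rfl⟩
    · exfalso; apply h
      have hn : PySem.List.pyRange j n 1 = [] := PySem.List.pyRange_one_eq_nil (by omega)
      simp [hn]
  · exfalso; apply h
    have hm : PySem.List.pyRange i m 1 = [] := PySem.List.pyRange_one_eq_nil (by omega)
    simp [hm]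

theorem mainEq (M : List (List Int)) (i j : Int) : min_coef M i j = min_coef_alt M i j := by
  simp only [min_coef, min_coef_alt]
  rw [nestedA]
  rw [keyB (fun p => pvGet2 M p.1 p.2), keyA (fun p => pvGet2 M p.1 p.2)]
  set L := ((PySem.List.pyRange i (M.length : Int) 1).flatMap
    (fun k => (PySem.List.pyRange j (((PySem.List.pyGet? M 0).getD []).length : Int) 1).map (fun l => (k, l)))) with hLdef
  show ((pvOut (fun p => pvGet2 M p.1 p.2) L (pvGet2 M i j) i j).2.1,
        (pvOut (fun p => pvGet2 M p.1 p.2) L (pvGet2 M i j) i j).2.2)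
      = match pvOmin (if pvGet2 M i j ≠ 0 then some (pvGet2 M i j) else none)
            (pvMnz (fun p => pvGet2 M p.1 p.2) L) with
        | none => (i, j)
        | some w => (L.find? (fun p => pvGet2 M p.1 p.2 == w)).getD (i, j)
  have hseed : (if pvGet2 M i j ≠ 0 then some (pvGet2 M i j) else none)
      = pvNz (fun p => pvGet2 M p.1 p.2) ((i, j) : Int × Int) := by
    by_cases h : pvGet2 M i j = 0 <;> simp [pvNz, h]
  rw [hseed]
  cases hm : pvMnz (fun p => pvGet2 M p.1 p.2) L with
  | none =>
    rw [pvOut_none _ _ _ _ _ hm, pvOmin_none_right]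
    cases hz : pvNz (fun p => pvGet2 M p.1 p.2) ((i, j) : Int × Int) with
    | none => rfl
    | some v0 =>
      by_cases hLnil : L = []
      · rw [hLnil]; rfl
      · exfalso
        obtain ⟨rest, hL⟩ := headL i j _ _ hLnil
        rw [← hLdef] at hL
        have h0 : pvGet2 M i j = 0 := by
          have := pvMnz_none_zero (fun p => pvGet2 M p.1 p.2) L hm (i, j)
            (by rw [hL]; exact List.mem_cons_self)
          simpa using this
        simp [pvNz, h0] at hz
  | some w =>
    have hne : L ≠ [] := by intro h0; rw [h0] at hm; simp [pvMnz] at hm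
    obtain ⟨rest, hL⟩ := headL i j _ _ hne
    rw [← hLdef] at hL
    have hmem : ((i, j) : Int × Int) ∈ L := by rw [hL]; exact List.mem_cons_self
    have hbest : pvOmin (pvNz (fun p => pvGet2 M p.1 p.2) ((i, j) : Int × Int)) (some w) = some w := by
      by_cases h : pvGet2 M i j = 0
      · simp [pvNz, h, pvOmin]
      · have hle := pvMnz_le (fun p => pvGet2 M p.1 p.2) L w hm (i, j) hmem (by simpa using h)
        simp only [pvNz] at *
        simp only [h]
        simp [pvOmin, min_eq_right (by simpa using hle)]
    rw [hbest, pvOut_some _ _ _ _ _ w hm]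
    by_cases hc : pvGet2 M i j ≠ 0 ∧ pvGet2 M i j ≤ w
    · have hle := pvMnz_le (fun p => pvGet2 M p.1 p.2) L w hm (i, j) hmem hc.1
      have hw : w = pvGet2 M i j := le_antisymm hle hc.2
      rw [if_pos hc]
      simp [hL, ← hw]
    · rw [if_neg hc]

-- ===== VERDICT (by name: the statement is the Claim_ definition above) =====
theorem min_coef_spec : Claim_equal_min_coef := by
  intro M i j _ _
  unfold Spec_min_coef
  exact mainEq M i j
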